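-- pv_equiv track=rewrite | github.com/rbf22/compose | compose/render/line_breaking.py | apply_line_breaks
-- ===== SOURCE A (Python) =====
-- from typing import List, Tuple, Dict, Any, Optional
--
-- def apply_line_breaks(words: List[str], break_indices: List[int]) -> str:
--     """
--     Apply line breaks at specified indices.
--
--     Args:
--         words: List of words
--         break_indices: Indices where to insert line breaks
--
--     Returns:
--         Formatted text with line breaks
--     """
--     result = []
--     break_set = set(break_indices)
--
--     for i, word in enumerate(words):
--         result.append(word)
--         if i + 1 in break_set:
--             result.append('\n')
--         elif i < len(words) - 1:
--             result.append(' ')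
--     # Return the joined string of words with inserted newlines
--     return ''.join(result)
-- ===== SOURCE B (Python) =====
-- def apply_line_breaks(words, break_indices):
--     """Slice words into segments at the valid cut positions, join each with ' ', join segments with '\n'."""
--     n = len(words)
--     cuts = sorted(c for c in set(break_indices) if 1 <= c <= n)
--     lines = []
--     prev = 0
--     for c in cuts:
--         lines.append(' '.join(words[prev:c]))
--         prev = c
--     lines.append(' '.join(words[prev:]))
--     return '\n'.join(lines)
-- ===== Notes on version B (the rewrite author's own statement) =====
-- stated objective: simpler
-- what changed: A walks word by word deciding after each word whether to emit '\n' or ' '; B instead computes the sorted valid cut positions once, slices the word list into segments at those cuts, joins each segment with ' ' and the segments with '\n'.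
import Mathlib
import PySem

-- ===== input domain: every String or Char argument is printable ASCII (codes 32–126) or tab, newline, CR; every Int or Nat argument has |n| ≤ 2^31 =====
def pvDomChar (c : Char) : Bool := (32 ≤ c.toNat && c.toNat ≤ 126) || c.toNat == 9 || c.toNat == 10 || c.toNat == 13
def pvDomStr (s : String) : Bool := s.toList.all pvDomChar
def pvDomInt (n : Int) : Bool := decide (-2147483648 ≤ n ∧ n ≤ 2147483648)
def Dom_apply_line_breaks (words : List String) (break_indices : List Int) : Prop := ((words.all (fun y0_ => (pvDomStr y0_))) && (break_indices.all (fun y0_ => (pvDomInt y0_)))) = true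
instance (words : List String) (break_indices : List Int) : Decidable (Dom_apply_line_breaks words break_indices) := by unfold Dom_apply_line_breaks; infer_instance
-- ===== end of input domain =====

-- B replaces A's word-by-word separator loop by slicing the word list at the valid cut positions and joining; objective: simpler decomposition (same cost).

-- ===== PORT A =====
def apply_line_breaks (words : List String) (break_indices : List Int) : String :=
  let break_set : PySem.Set Int := PySem.Set.ofList break_indices
  let result : List String :=
    (PySem.List.enumerate words 0).foldl
      (fun (result : List String) iw =>
        let result := result ++ [iw.2]
        if break_set.contains (iw.1 + 1) then result ++ ["\n"]
        else if iw.1 < (words.length : Int) - 1 then result ++ [" "]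
        else result) []
  PySem.Str.join "" result

-- ===== PORT B =====
def apply_line_breaks_alt (words : List String) (break_indices : List Int) : String :=
  let n : Int := (words.length : Int)
  let cuts : List Int :=
    PySem.List.sorted ((PySem.Set.ofList break_indices).filter (fun c => 1 ≤ c && c ≤ n)) (fun x => x) false
  let st : List String × Int :=
    cuts.foldl
      (fun (st : List String × Int) c =>
        (st.1 ++ [PySem.Str.join " " (PySem.List.slice words (some st.2) (some c))], c))
      ([], 0)
  PySem.Str.join "\n" (st.1 ++ [PySem.Str.join " " (PySem.List.slice words (some st.2) none)])

-- ===== PRECONDITION & SPEC =====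
def Spec_apply_line_breaks (words : List String) (break_indices : List Int) (out : String) : Prop := out = apply_line_breaks_alt words break_indices
instance (words : List String) (break_indices : List Int) (out : String) : Decidable (Spec_apply_line_breaks words break_indices out) := by unfold Spec_apply_line_breaks; infer_instance

-- ===== CLAIM (what is proved, stated in full; the proofs are below) =====
def Claim_equal_apply_line_breaks : Prop := ∀ (words : List String) (break_indices : List Int), Dom_apply_line_breaks words break_indices → Spec_apply_line_breaks words break_indices (apply_line_breaks words break_indices)

-- ===== LEMMAS AND PROOFS =====

-- the common reference: the output both programs build, as a list of chars; `mem q` says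
-- "q is a break position"; j is the 0-based index of the first word of ws in the whole list
def pvRender (mem : Nat → Bool) : List (List Char) → Nat → List Char
  | [], _ => []
  | w :: ws, j =>
      w ++ (if mem (j+1) then ['\n'] else if ws.isEmpty then [] else [' ']) ++ pvRender mem ws (j+1)

-- B's line list at spec level: the segments of ws cut at the (absolute) positions `cuts`
def pvSegs (cuts : List Int) (ws : List String) (j : Nat) : List String :=
  match cuts with
  | [] => [PySem.Str.join " " ws]
  | c :: cs => PySem.Str.join " " (ws.take (c.toNat - j)) :: pvSegs cs (ws.drop (c.toNat - j)) c.toNat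

theorem pvNl : ("\n" : String).toList = ['\n'] := by decide
theorem pvSp : (" " : String).toList = [' '] := by decide
theorem pvEmp : ("" : String).toList = [] := by decide

theorem pvJoin_empty_sep (l : List (List Char)) : PySem.Chars.join [] l = l.flatten := by
  induction l with
  | nil => simp [PySem.Chars.join_nil]
  | cons a t ih =>
    cases t with
    | nil => simp [PySem.Chars.join_singleton]
    | cons b t' => simp [PySem.Chars.join_cons_cons] at *; simp [ih]

theorem pvA_fold (bset : PySem.Set Int) (n : Nat) :
    ∀ (ws : List String) (j : Nat) (acc : List String), j + ws.length = n →
    (((PySem.List.enumerate ws (j : Int)).foldl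
        (fun (result : List String) iw =>
          let result := result ++ [iw.2]
          if bset.contains (iw.1 + 1) then result ++ ["\n"]
          else if iw.1 < (n : Int) - 1 then result ++ [" "]
          else result) acc).map String.toList).flatten
      = (acc.map String.toList).flatten ++ pvRender (fun q => bset.contains (q : Int)) (ws.map String.toList) j := by
  intro ws
  induction ws with
  | nil => intro j acc h; simp [PySem.List.enumerate_nil, pvRender]
  | cons w ws ih =>
    intro j acc h
    rw [PySem.List.enumerate_cons]
    simp only [List.foldl_cons]
    have hcast : (j : Int) + 1 = ((j + 1 : Nat) : Int) := by push_cast; ring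
    have hlt : ((j : Int) < (n : Int) - 1) ↔ ws.isEmpty = false := by
      cases ws <;> simp [List.length] at h ⊢ <;> omega
    simp only [hcast]
    by_cases hb : bset.contains ((j + 1 : Nat) : Int) = true
    · have hb' : ((j : Int) + 1) ∈ bset := by rw [hcast]; exact (PySem.Set.contains_iff _ _).mp hb
      simp only [hb, if_true]
      rw [ih (j+1) _ (by simp at h ⊢; omega)]
      simp [pvRender, hb', pvNl]
    · simp only [Bool.not_eq_true] at hb
      have hb' : ¬ ((j : Int) + 1) ∈ bset := fun hm => by
        rw [hcast] at hm
        rw [(PySem.Set.contains_iff _ _).mpr hm] at hb; exact Bool.true_eq_false.mp hb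
      simp only [hb, Bool.false_eq_true, if_false]
      by_cases hw : ws.isEmpty = false
      · rw [if_pos (hlt.mpr hw)]
        rw [ih (j+1) _ (by simp at h ⊢; omega)]
        simp [pvRender, hb', hw, pvSp]
      · simp only [Bool.not_eq_false] at hw
        rw [if_neg (by rw [hlt]; simp [hw])]
        rw [ih (j+1) _ (by simp at h ⊢; omega)]
        simp [pvRender, hb', hw]

theorem pvSegs_ne_nil (cuts : List Int) (ws : List String) (j : Nat) : pvSegs cuts ws j ≠ [] := by
  cases cuts <;> simp [pvSegs]

theorem pvB_fold (words : List String) :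
    ∀ (cuts : List Int) (acc : List String) (j : Nat),
    (∀ c ∈ cuts, (j : Int) < c ∧ c ≤ (words.length : Int)) →
    cuts.Pairwise (· < ·) →
    (cuts.foldl (fun (st : List String × Int) c =>
        (st.1 ++ [PySem.Str.join " " (PySem.List.slice words (some st.2) (some c))], c)) (acc, (j : Int))).1
      ++ [PySem.Str.join " " (PySem.List.slice words
            (some (cuts.foldl (fun (st : List String × Int) c =>
              (st.1 ++ [PySem.Str.join " " (PySem.List.slice words (some st.2) (some c))], c)) (acc, (j : Int))).2) none)]
      = acc ++ pvSegs cuts (words.drop j) j := by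
  intro cuts
  induction cuts with
  | nil =>
    intro acc j _ _
    simp [pvSegs, PySem.List.slice_from_natCast]
  | cons c cs ih =>
    intro acc j hb hp
    have hc0 : (j : Int) < c := (hb c (by simp)).1
    have hcn : c ≤ (words.length : Int) := (hb c (by simp)).2
    have hcast : c = ((c.toNat : Nat) : Int) := by omega
    simp only [List.foldl_cons]
    rw [hcast]
    rw [ih (acc ++ [PySem.Str.join " " (PySem.List.slice words (some (j : Int)) (some ((c.toNat : Nat) : Int)))]) c.toNat
        (by intro c' hc'; have := (hb c' (by simp [hc'])).2; have hlt := (List.pairwise_cons.mp hp).1 c' hc'; constructor <;> omega)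
        ((List.pairwise_cons.mp hp).2)]
    rw [PySem.List.slice_natCast]
    have hdd : words.drop c.toNat = (words.drop j).drop (c.toNat - j) := by
      rw [List.drop_drop]; congr 1; omega
    rw [hdd]
    simp [pvSegs, List.append_assoc, show max c 0 = c from by omega]

theorem pvJsp (mem : Nat → Bool) :
    ∀ (ws : List (List Char)) (j : Nat),
    (∀ q, j < q → q ≤ j + ws.length → mem q = false) →
    PySem.Chars.join [' '] ws = pvRender mem ws j := by
  intro ws
  induction ws with
  | nil => intro j _; simp [PySem.Chars.join_nil, pvRender]
  | cons w t ih =>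
    intro j h
    cases t with
    | nil =>
      simp [PySem.Chars.join_singleton, pvRender, h (j+1) (by omega) (by simp)]
    | cons x t' =>
      rw [PySem.Chars.join_cons_cons]
      rw [ih (j+1) (by intro q h1 h2; exact h q (by omega) (by simp at h2 ⊢; omega))]
      simp [pvRender, h (j+1) (by omega) (by simp)]

theorem pvSplit (mem : Nat → Bool) :
    ∀ (k : Nat) (ws : List (List Char)) (j : Nat),
    1 ≤ k → k ≤ ws.length →
    mem (j + k) = true →
    (∀ q, j < q → q < j + k → mem q = false) →
    pvRender mem ws j = PySem.Chars.join [' '] (ws.take k) ++ '\n' :: pvRender mem (ws.drop k) (j + k) := by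
  intro k
  induction k with
  | zero => intro ws j h; omega
  | succ k' ih =>
    intro ws j _ hlen hmem hmid
    match ws with
    | [] => simp at hlen
    | w :: t =>
      cases Nat.eq_zero_or_pos k' with
      | inl h0 =>
        subst h0
        simp only [List.take_succ_cons, List.take_zero, List.drop_succ_cons, List.drop_zero]
        rw [PySem.Chars.join_singleton]
        simp [pvRender, hmem]
      | inr hk1 =>
        have hne : mem (j+1) = false := hmid (j+1) (by omega) (by omega)
        have htne : t ≠ [] := by simp at hlen; intro h; subst h; simp at hlen; omega
        have ht : pvRender mem (w :: t) j = w ++ [' '] ++ pvRender mem t (j+1) := by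
          simp [pvRender, hne, htne]
        rw [ht]
        rw [ih t (j+1) hk1 (by simp at hlen; omega) (by rw [show j+1+k' = j+(k'+1) by omega]; exact hmem)
            (by intro q h1 h2; exact hmid q (by omega) (by omega))]
        have htake : (w :: t).take (k'+1) = w :: t.take k' := by simp
        rw [htake]
        obtain ⟨a, r, har⟩ : ∃ a r, t.take k' = a :: r := by
          cases ht' : t.take k' with
          | nil => exfalso; have := List.length_take_of_le (l := t) (by simp at hlen; omega : k' ≤ t.length); rw [ht'] at this; simp at this; omega
          | cons a r => exact ⟨a, r, rfl⟩
        rw [har, PySem.Chars.join_cons_cons, ← har]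
        simp only [List.drop_succ_cons]
        rw [show j + (k'+1) = j + 1 + k' by omega]
        simp [List.append_assoc]

theorem pvSegs_render (mem : Nat → Bool) :
    ∀ (cuts : List Int) (ws : List String) (j : Nat),
    cuts.Pairwise (· < ·) →
    (∀ c ∈ cuts, (j : Int) < c ∧ c ≤ (j : Int) + ws.length) →
    (∀ q : Nat, j < q → q ≤ j + ws.length → (mem q = true ↔ (q : Int) ∈ cuts)) →
    PySem.Chars.join ['\n'] ((pvSegs cuts ws j).map String.toList) = pvRender mem (ws.map String.toList) j := by
  intro cuts
  induction cuts with
  | nil =>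
    intro ws j _ _ hm
    simp only [pvSegs, List.map_cons, List.map_nil]
    rw [PySem.Chars.join_singleton, PySem.Str.toList_join, pvSp]
    exact pvJsp mem (ws.map String.toList) j (by
      intro q h1 h2
      simp only [List.length_map] at h2
      have := hm q h1 h2
      simp at this
      exact this)
  | cons c cs ih =>
    intro ws j hp hb hm
    have hc0 : (j : Int) < c := (hb c (by simp)).1
    have hcn : c ≤ (j : Int) + ws.length := (hb c (by simp)).2
    have hk1 : 1 ≤ c.toNat - j := by omega
    have hkl : c.toNat - j ≤ ws.length := by omega
    have hjk : j + (c.toNat - j) = c.toNat := by omega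
    simp only [pvSegs, List.map_cons]
    obtain ⟨b, r, hbr⟩ : ∃ b r, (pvSegs cs (ws.drop (c.toNat - j)) c.toNat).map String.toList = b :: r := by
      cases hx : (pvSegs cs (ws.drop (c.toNat - j)) c.toNat).map String.toList with
      | nil => exact absurd (List.map_eq_nil_iff.mp hx) (pvSegs_ne_nil _ _ _)
      | cons b r => exact ⟨b, r, rfl⟩
    rw [hbr, PySem.Chars.join_cons_cons, ← hbr]
    rw [ih (ws.drop (c.toNat - j)) c.toNat
        ((List.pairwise_cons.mp hp).2)
        (by
          intro c' hc'
          have h1 := (List.pairwise_cons.mp hp).1 c' hc'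
          have h2 := (hb c' (by simp [hc'])).2
          constructor
          · omega
          · simp only [List.length_drop]; omega)
        (by
          intro q h1 h2
          simp only [List.length_drop] at h2
          have := hm q (by omega) (by omega)
          rw [this]
          simp only [List.mem_cons]
          constructor
          · rintro (h | h)
            · exfalso; omega
            · exact h
          · intro h; right; exact h)]
    rw [pvSplit mem (c.toNat - j) (ws.map String.toList) j hk1 (by simpa using hkl)
        (by rw [hjk]; exact (hm c.toNat (by omega) (by omega)).mpr (by simp; left; omega))
        (by
          intro q h1 h2
          have := hm q h1 (by omega)
          by_contra hq
          simp only [Bool.not_eq_false] at hq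
          have := this.mp hq
          simp only [List.mem_cons] at this
          rcases this with h | h
          · omega
          · have := (List.pairwise_cons.mp hp).1 _ h; omega)]
    rw [PySem.Str.toList_join, pvSp, List.map_take, List.map_drop, hjk]
    simp

theorem pvA_render (words : List String) (break_indices : List Int) :
    (apply_line_breaks words break_indices).toList =
      pvRender (fun q => (PySem.Set.ofList break_indices).contains (q : Int)) (words.map String.toList) 0 := by
  unfold apply_line_breaks
  rw [PySem.Str.toList_join, pvEmp, pvJoin_empty_sep]
  have := pvA_fold (PySem.Set.ofList break_indices) words.length words 0 [] (by simp)
  simpa using this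

theorem pvB_render (words : List String) (break_indices : List Int) :
    (apply_line_breaks_alt words break_indices).toList =
      pvRender (fun q => (PySem.Set.ofList break_indices).contains (q : Int)) (words.map String.toList) 0 := by
  unfold apply_line_breaks_alt
  have hnd : (PySem.List.sorted ((PySem.Set.ofList break_indices).filter
      (fun c => 1 ≤ c && c ≤ (words.length : Int))) (fun x => x) false).Nodup := by
    rw [List.Perm.nodup_iff (PySem.List.sorted_perm _ _ _)]
    exact (PySem.Set.nodup_ofList break_indices).filter _
  have hpl : (PySem.List.sorted ((PySem.Set.ofList break_indices).filter
      (fun c => 1 ≤ c && c ≤ (words.length : Int))) (fun x => x) false).Pairwise (· < ·) := by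
    have hle := PySem.List.sorted_pairwise ((PySem.Set.ofList break_indices).filter
      (fun c => 1 ≤ c && c ≤ (words.length : Int))) (fun x => x)
    exact (hle.and hnd).imp (fun h => lt_of_le_of_ne h.1 h.2)
  have hmemc : ∀ x : Int, x ∈ PySem.List.sorted ((PySem.Set.ofList break_indices).filter
      (fun c => 1 ≤ c && c ≤ (words.length : Int))) (fun x => x) false ↔
      (x ∈ PySem.Set.ofList break_indices ∧ 1 ≤ x ∧ x ≤ (words.length : Int)) := by
    intro x
    rw [PySem.List.mem_sorted, List.mem_filter]
    simp
  have hbnd : ∀ c ∈ PySem.List.sorted ((PySem.Set.ofList break_indices).filter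
      (fun c => 1 ≤ c && c ≤ (words.length : Int))) (fun x => x) false,
      ((0 : Nat) : Int) < c ∧ c ≤ (words.length : Int) := by
    intro c hc
    have := (hmemc c).mp hc
    constructor <;> omega
  have hfold := pvB_fold words _ [] 0 hbnd hpl
  simp only [Nat.cast_zero, List.nil_append, List.drop_zero] at hfold
  rw [PySem.Str.toList_join, pvNl, hfold]
  exact pvSegs_render _ _ words 0 hpl
    (by intro c hc; have := (hmemc c).mp hc; constructor <;> [omega; (push_cast; omega)])
    (by
      intro q h1 h2
      rw [hmemc]
      rw [PySem.Set.contains_iff]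
      constructor
      · intro h; exact ⟨h, by omega, by omega⟩
      · intro h; exact h.1)

-- ===== VERDICT (by name: the statement is the Claim_ definition above) =====
theorem apply_line_breaks_spec : Claim_equal_apply_line_breaks := by
  intro words break_indices _
  unfold Spec_apply_line_breaks
  apply String.toList_inj.mp
  rw [pvA_render, pvB_render]
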